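-- pv_equiv track=rewrite | github.com/Xinaizhang/CEG5201_multiprocessing | src/oddeven_transposition_sort/C42.py | compare_and_swap
-- ===== SOURCE A (Python) =====
-- def compare_and_swap(sub_array):
--     """对子数组进行比较和交换"""
--     n = len(sub_array)
--     swapped = False
--     for i in range(0, n - 1, 2):
--         if sub_array[i] > sub_array[i + 1]:
--             sub_array[i], sub_array[i + 1] = sub_array[i + 1], sub_array[i]
--             swapped = True
--     return swapped, sub_array
-- ===== SOURCE B (Python) =====
-- def compare_and_swap(sub_array):
--     """对子数组进行比较和交换"""
--     pairs = list(zip(sub_array[0::2], sub_array[1::2]))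
--     swapped = any(l > r for l, r in pairs)
--     fixed = [v for l, r in pairs for v in (min(l, r), max(l, r))]
--     sub_array[:len(fixed)] = fixed
--     return swapped, sub_array
-- ===== Notes on version B (the rewrite author's own statement) =====
-- stated objective: alternative
-- what changed: Replaces the index loop with in-place swaps by a data-parallel decomposition: zip the two strided views sub_array[0::2]/sub_array[1::2], derive the flag with any() and the fixed prefix as interleaved min/max pairs, written back by one slice assignment.
import Mathlib
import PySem

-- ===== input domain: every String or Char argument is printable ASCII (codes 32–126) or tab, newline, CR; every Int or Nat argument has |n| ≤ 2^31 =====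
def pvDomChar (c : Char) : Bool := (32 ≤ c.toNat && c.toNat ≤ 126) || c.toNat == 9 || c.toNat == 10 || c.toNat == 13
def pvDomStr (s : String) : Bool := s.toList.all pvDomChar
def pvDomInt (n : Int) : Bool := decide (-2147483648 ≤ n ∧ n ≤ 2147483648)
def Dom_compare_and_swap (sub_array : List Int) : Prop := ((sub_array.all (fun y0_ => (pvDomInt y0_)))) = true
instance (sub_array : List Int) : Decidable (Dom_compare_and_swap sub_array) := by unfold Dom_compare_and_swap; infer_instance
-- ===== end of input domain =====

-- B replaces A's index loop by zipping the two strided views and writing back interleaved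
-- min/max pairs (objective: alternative decomposition, same O(n) cost). Both A and B mutate
-- the argument list in place in Python (B via slice assignment, same final contents);
-- the Lean equivalence is about the returned (flag, list) value.

-- ===== PORT A =====
def compare_and_swap (sub_array : List Int) : Bool × List Int :=
  let n := PySem.List.len sub_array
  (PySem.List.pyRange 0 (n - 1) 2).foldl
    (fun st i =>
      if PySem.List.pyGetD st.2 i 0 > PySem.List.pyGetD st.2 (i + 1) 0 then
        (true, PySem.List.pySetD (PySem.List.pySetD st.2 i (PySem.List.pyGetD st.2 (i + 1) 0))
                 (i + 1) (PySem.List.pyGetD st.2 i 0))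
      else st)
    (false, sub_array)

-- ===== PORT B =====
-- hand port of the strided views sub_array[0::2] (= everyOther xs) and sub_array[1::2]
-- (= everyOther xs.tail): exact — elements at even (resp. odd) indices, in order
def everyOther {α : Type} : List α → List α
  | [] => []
  | [a] => [a]
  | a :: _ :: t => a :: everyOther t

def compare_and_swap_alt (sub_array : List Int) : Bool × List Int :=
  let pairs := (everyOther sub_array).zip (everyOther sub_array.tail)
  let swapped := pairs.any (fun p => decide (p.1 > p.2))
  let fixed := pairs.flatMap (fun p => [min p.1 p.2, max p.1 p.2])
  (swapped, fixed ++ sub_array.drop fixed.length)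

-- ===== PRECONDITION & SPEC =====
def Spec_compare_and_swap (sub_array : List Int) (out : Bool × List Int) : Prop := out = compare_and_swap_alt sub_array
instance (sub_array : List Int) (out : Bool × List Int) : Decidable (Spec_compare_and_swap sub_array out) := by unfold Spec_compare_and_swap; infer_instance

-- ===== CLAIM (what is proved, stated in full; the proofs are below) =====
def Claim_equal_compare_and_swap : Prop := ∀ (sub_array : List Int), Dom_compare_and_swap sub_array → Spec_compare_and_swap sub_array (compare_and_swap sub_array)

-- ===== LEMMAS AND PROOFS =====

-- A's loop body with the index already a natural number 2*k
def stepN (st : Bool × List Int) (k : Nat) : Bool × List Int :=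
  if st.2.getD (2 * k) 0 > st.2.getD (2 * k + 1) 0 then
    (true, (st.2.set (2 * k) (st.2.getD (2 * k + 1) 0)).set (2 * k + 1) (st.2.getD (2 * k) 0))
  else st

theorem everyOther_cons {α : Type} (b : α) (t : List α) :
    everyOther (b :: t) = b :: everyOther t.tail := by
  cases t <;> simp [everyOther]

theorem stepN_shift (ks : List Nat) (sw : Bool) (x y : Int) (t : List Int) :
    ks.foldl (fun st k => stepN st (k + 1)) (sw, x :: y :: t)
      = ((ks.foldl stepN (sw, t)).1, x :: y :: (ks.foldl stepN (sw, t)).2) := by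
  induction ks generalizing sw t with
  | nil => rfl
  | cons k ks ih =>
      have h2 : 2 * (k + 1) = (2 * k) + 1 + 1 := by ring
      simp only [List.foldl_cons]
      rw [show stepN (sw, x :: y :: t) (k + 1)
            = ((stepN (sw, t) k).1, x :: y :: (stepN (sw, t) k).2) by
          simp only [stepN, h2]
          by_cases h : t[2 * k + 1]?.getD 0 < t[2 * k]?.getD 0 <;>
            simp [h]]
      exact ih _ _

theorem key : ∀ (xs : List Int) (sw : Bool),
    (List.range (xs.length / 2)).foldl stepN (sw, xs)
      = (sw || (compare_and_swap_alt xs).1, (compare_and_swap_alt xs).2)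
  | [], sw => by simp [compare_and_swap_alt, everyOther]
  | [a], sw => by simp [compare_and_swap_alt, everyOther]
  | a :: b :: t, sw => by
      have ih := key t
      have hlen : (a :: b :: t).length / 2 = t.length / 2 + 1 := by
        simp [List.length_cons]; omega
      rw [hlen, List.range_succ_eq_map, List.foldl_cons, List.foldl_map]
      have h0 : stepN (sw, a :: b :: t) 0
          = if a > b then (true, b :: a :: t) else (sw, a :: b :: t) := by
        simp [stepN]
      rw [h0]
      by_cases hab : a > b
      · simp only [if_pos hab]
        rw [stepN_shift (List.range (t.length / 2)) true b a t, ih true]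
        simp [compare_and_swap_alt, everyOther_cons, everyOther]
        exact ⟨Or.inr (Or.inl hab), le_of_lt hab⟩
      · simp only [if_neg hab]
        rw [stepN_shift (List.range (t.length / 2)) sw a b t, ih sw]
        simp [compare_and_swap_alt, everyOther_cons, everyOther, hab]
        omega

-- ===== VERDICT (by name: the statement is the Claim_ definition above) =====
theorem compare_and_swap_spec : Claim_equal_compare_and_swap := by
  intro xs _
  unfold Spec_compare_and_swap compare_and_swap
  show List.foldl
      (fun (st : Bool × List Int) (i : Int) =>
        if PySem.List.pyGetD st.2 i 0 > PySem.List.pyGetD st.2 (i + 1) 0 then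
          (true,
            PySem.List.pySetD (PySem.List.pySetD st.2 i (PySem.List.pyGetD st.2 (i + 1) 0)) (i + 1)
              (PySem.List.pyGetD st.2 i 0))
        else st)
      (false, xs) (PySem.List.pyRange 0 (PySem.List.len xs - 1) 2) = compare_and_swap_alt xs
  rw [PySem.List.pyRange_of_pos 0 (PySem.List.len xs - 1) (by norm_num)]
  have hcnt : (if (0:Int) < PySem.List.len xs - 1
        then ((PySem.List.len xs - 1 - 0 + 2 - 1) / 2).toNat else 0) = xs.length / 2 := by
    simp only [PySem.List.len]
    split_ifs <;> omega
  rw [hcnt, List.foldl_map]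
  have hfun : ∀ (st : Bool × List Int) (k : Nat),
      (if PySem.List.pyGetD st.2 (0 + 2 * (k:Int)) 0 > PySem.List.pyGetD st.2 (0 + 2 * (k:Int) + 1) 0 then
        (true, PySem.List.pySetD (PySem.List.pySetD st.2 (0 + 2 * (k:Int)) (PySem.List.pyGetD st.2 (0 + 2 * (k:Int) + 1) 0))
                 (0 + 2 * (k:Int) + 1) (PySem.List.pyGetD st.2 (0 + 2 * (k:Int)) 0))
      else st) = stepN st k := by
    intro st k
    have e1 : (0:Int) + 2 * (k:Int) = ((2 * k : Nat) : Int) := by push_cast; ring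
    have e2 : ((2 * k : Nat) : Int) + 1 = ((2 * k + 1 : Nat) : Int) := by push_cast; ring
    rw [e1, e2]
    simp only [PySem.List.pyGetD_natCast, PySem.List.pySetD_natCast, stepN]
  simp only [hfun]
  rw [key xs false]
  simp
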